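-- pv_equiv track=rewrite | github.com/ankitkumar-13/PyramidBuilder | PyramidBuilder.py | route_adder
-- ===== SOURCE A (Python) =====
-- def get_file_name(Path):  # Returns a tuple with File name without extension as first element and file name with extension as second from the full path of the file.
--     _return_with_extension = ""
--     for i in range(1, len(Path) + 1):
--         if Path[-i] == "/":
--             break
--         else:
--             _return_with_extension = Path[-i] + _return_with_extension
--     _return = ""
--     for j in range(0, len(_return_with_extension)):
--         if _return_with_extension[j] == ".":
--             break
--         else:
--             _return += _return_with_extension[j]
--     final = (_return, _return_with_extension)
--     return final
--
-- def route_adder(IN):  # Returns two lines needed by pyramid for creating a view and adding path/route of file.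
--     _return = ""
--     for i in range(0, len(IN)):
--         File_Details = get_file_name(IN[i])
--         Individual_Files = "        config.add_route(\'" + File_Details[0] + "\',\'/" + File_Details[
--             1] + "\')\n" + "        config.add_view(" + File_Details[0] + ", route_name = \'" + File_Details[
--                                0] + "\')\n"
--         _return += Individual_Files
--     return _return
-- ===== SOURCE B (Python) =====
-- def route_adder(IN):  # Returns two lines needed by pyramid for creating a view and adding path/route of file.
--     def block(path):
--         with_ext = path.split('/')[-1]
--         name = with_ext.split('.', 1)[0]
--         return ("        config.add_route('" + name + "','/" + with_ext + "')\n"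
--                 "        config.add_view(" + name + ", route_name = '" + name + "')\n")
--     return ''.join(block(p) for p in IN)
-- ===== Notes on version B (the rewrite author's own statement) =====
-- stated objective: simpler
-- what changed: get_file_name's two explicit character-by-character scan loops (a reversed scan collecting chars until '/', then a forward scan until '.') are replaced by closed-form string splitting — path.split('/')[-1] and split('.',1)[0] — and the result is assembled with ''.join over a generator instead of repeated string +=.
import Mathlib
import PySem

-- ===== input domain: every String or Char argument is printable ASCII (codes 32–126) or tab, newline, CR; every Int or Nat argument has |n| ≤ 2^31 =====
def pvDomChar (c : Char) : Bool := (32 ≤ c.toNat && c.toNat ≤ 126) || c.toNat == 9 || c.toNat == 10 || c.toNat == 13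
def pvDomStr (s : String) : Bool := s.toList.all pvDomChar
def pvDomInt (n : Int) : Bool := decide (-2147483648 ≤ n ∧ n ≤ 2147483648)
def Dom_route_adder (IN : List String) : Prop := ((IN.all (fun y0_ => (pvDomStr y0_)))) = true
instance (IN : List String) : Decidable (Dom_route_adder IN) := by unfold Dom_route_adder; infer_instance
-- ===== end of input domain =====

-- B replaces A's two character-by-character scan loops with closed-form string splitting
-- (split('/')[-1], split('.',1)[0]) and builds the result with ''.join; objective: simpler.

-- ===== PORT A =====
-- first loop of get_file_name: Path[-i] for i = 1.. walks the reversed characters,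
-- prepending each until a '/' is hit (break)
def gfnLoop1 : List Char → List Char → List Char
  | [], acc => acc
  | c :: rest, acc => if c = '/' then acc else gfnLoop1 rest (c :: acc)

-- second loop: append characters left-to-right until a '.' is hit (break)
def gfnLoop2 : List Char → List Char
  | [] => []
  | c :: rest => if c = '.' then [] else c :: gfnLoop2 rest

def get_file_name (path : String) : String × String :=
  let withExt := gfnLoop1 path.toList.reverse []
  let name := gfnLoop2 withExt
  (String.ofList name, String.ofList withExt)

def route_adder (IN : List String) : String :=
  IN.foldl (fun acc p =>
    let fd := get_file_name p
    acc ++ ("        config.add_route('" ++ fd.1 ++ "','/" ++ fd.2 ++ "')\n"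
      ++ "        config.add_view(" ++ fd.1 ++ ", route_name = '" ++ fd.1 ++ "')\n")) ""

-- ===== PORT B =====
-- path.split('/')[-1] ported as getLastD of List.splitOn (split on a single char; the
-- result of str.split with nonempty sep is nonempty, so [-1] is its last element);
-- with_ext.split('.', 1)[0] ported as headI of List.splitOn (first piece of the
-- maxsplit=1 split = first piece of the full split)
def fmtBlock (p : String) : String :=
  let withExt := (List.splitOn '/' p.toList).getLastD []
  let name := (List.splitOn '.' withExt).headI
  "        config.add_route('" ++ String.ofList name ++ "','/" ++ String.ofList withExt ++ "')\n"
    ++ "        config.add_view(" ++ String.ofList name ++ ", route_name = '" ++ String.ofList name ++ "')\n"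

-- ''.join(...) ported as String.join over the mapped list
def route_adder_alt (IN : List String) : String :=
  String.join (IN.map fmtBlock)

-- ===== PRECONDITION & SPEC =====
def Spec_route_adder (IN : List String) (out : String) : Prop := out = route_adder_alt IN
instance (IN : List String) (out : String) : Decidable (Spec_route_adder IN out) := by unfold Spec_route_adder; infer_instance

-- ===== CLAIM (what is proved, stated in full; the proofs are below) =====
def Claim_equal_route_adder : Prop := ∀ (IN : List String), Dom_route_adder IN → Spec_route_adder IN (route_adder IN)

-- ===== LEMMAS AND PROOFS =====
theorem splitOn_cons (sep c : Char) (cs : List Char) :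
    List.splitOn sep (c :: cs) =
      if c = sep then [] :: List.splitOn sep cs
      else (List.splitOn sep cs).modifyHead (c :: ·) := by
  simp [List.splitOn, List.splitOnP_cons]

theorem splitOn_of_not_mem {sep : Char} {cs : List Char} (h : sep ∉ cs) :
    List.splitOn sep cs = [cs] := by
  induction cs with
  | nil => simp [List.splitOn]
  | cons c rest ih =>
      simp only [List.mem_cons, not_or] at h
      rw [splitOn_cons, if_neg (fun hc => h.1 hc.symm), ih h.2]
      rfl

theorem splitOn_two_piece {sep : Char} {cs : List Char} (h : sep ∈ cs) :
    ∃ a b t, List.splitOn sep cs = a :: b :: t := by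
  induction cs with
  | nil => simp at h
  | cons c rest ih =>
      by_cases hc : c = sep
      · rw [splitOn_cons, if_pos hc]
        rcases hS : List.splitOn sep rest with _ | ⟨b, t⟩
        · exact absurd hS (List.splitOnP_ne_nil _ _)
        · exact ⟨[], b, t, rfl⟩
      · have hm : sep ∈ rest := by
          rcases List.mem_cons.mp h with h1 | h1
          · exact absurd h1.symm hc
          · exact h1
        obtain ⟨a, b, t, hS⟩ := ih hm
        rw [splitOn_cons, if_neg hc, hS]
        exact ⟨c :: a, b, t, rfl⟩

theorem takeWhile_full {cs : List Char} (h : '/' ∉ cs) :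
    cs.takeWhile (· ≠ '/') = cs := by
  rw [List.takeWhile_eq_self_iff]
  intro x hx
  have : x ≠ '/' := fun he => h (he ▸ hx)
  simp [this]

theorem splitOn_getLast (cs : List Char) :
    (List.splitOn '/' cs).getLastD [] = (cs.reverse.takeWhile (· ≠ '/')).reverse := by
  induction cs with
  | nil => simp [List.splitOn]
  | cons c rest ih =>
      rw [splitOn_cons]
      by_cases hm : '/' ∈ rest
      · have hcond : (rest.reverse.takeWhile (· ≠ '/')).length ≠ rest.reverse.length := by
          intro hlen
          have hpre : rest.reverse.takeWhile (· ≠ '/') <+: rest.reverse :=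
            List.takeWhile_prefix _
          have heq : rest.reverse.takeWhile (· ≠ '/') = rest.reverse :=
            List.IsPrefix.eq_of_length hpre hlen
          have hin : '/' ∈ rest.reverse.takeWhile (· ≠ '/') := by
            rw [heq]; exact List.mem_reverse.mpr hm
          have := List.mem_takeWhile_imp hin
          simp at this
        have hrhs : ((c :: rest).reverse.takeWhile (· ≠ '/')).reverse
            = (rest.reverse.takeWhile (· ≠ '/')).reverse := by
          rw [List.reverse_cons, List.takeWhile_append, if_neg hcond]
        rw [hrhs, ← ih]
        obtain ⟨a, b, t, hS⟩ := splitOn_two_piece hm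
        by_cases hc : c = '/'
        · rw [if_pos hc, List.getLastD_cons]
        · rw [if_neg hc, hS]
          simp [List.modifyHead]
      · have hS := splitOn_of_not_mem hm
        have hfull : rest.reverse.takeWhile (· ≠ '/') = rest.reverse :=
          takeWhile_full (by simpa using hm)
        have hcond : (rest.reverse.takeWhile (· ≠ '/')).length = rest.reverse.length := by
          rw [hfull]
        rw [List.reverse_cons, List.takeWhile_append, if_pos hcond, hS]
        by_cases hc : c = '/'
        · rw [if_pos hc]
          subst hc
          simp [List.takeWhile]
        · rw [if_neg hc]
          simp [List.modifyHead, List.takeWhile, hc]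

theorem gfnLoop1_eq (rs acc : List Char) :
    gfnLoop1 rs acc = (rs.takeWhile (· ≠ '/')).reverse ++ acc := by
  induction rs generalizing acc with
  | nil => simp [gfnLoop1]
  | cons c rest ih =>
      by_cases h : c = '/'
      · simp [gfnLoop1, h]
      · simp [gfnLoop1, h, ih]

theorem gfnLoop2_eq (ds : List Char) :
    gfnLoop2 ds = (List.splitOn '.' ds).headI := by
  induction ds with
  | nil => simp [gfnLoop2, List.splitOn]
  | cons c rest ih =>
      rw [gfnLoop2, splitOn_cons]
      by_cases hc : c = '.'
      · rw [if_pos hc, if_pos hc]; rfl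
      · rw [if_neg hc, if_neg hc, ih]
        rcases hS : List.splitOn '.' rest with _ | ⟨b, t⟩
        · exact absurd hS (List.splitOnP_ne_nil _ _)
        · rfl

theorem block_eq (p : String) :
    "        config.add_route('" ++ (get_file_name p).1 ++ "','/" ++ (get_file_name p).2
      ++ "')\n" ++ "        config.add_view(" ++ (get_file_name p).1 ++ ", route_name = '"
      ++ (get_file_name p).1 ++ "')\n"
      = fmtBlock p := by
  have h1 : gfnLoop1 p.toList.reverse [] = (List.splitOn '/' p.toList).getLastD [] := by
    rw [gfnLoop1_eq, splitOn_getLast, List.append_nil]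
  simp only [get_file_name, fmtBlock, h1, gfnLoop2_eq]

-- ===== VERDICT (by name: the statement is the Claim_ definition above) =====
theorem route_adder_spec : Claim_equal_route_adder := by
  intro IN _
  unfold Spec_route_adder route_adder route_adder_alt String.join
  rw [List.foldl_map]
  apply List.foldl_ext
  intro acc p _
  rw [← block_eq p]
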